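-- pv_equiv track=rewrite | github.com/dividing-by-zaro/nv-malpractice-explorer | scripts/batch/process_complaints.py | filter_complaints
-- ===== SOURCE A (Python) =====
-- COMPLAINT_PRIORITY = {
--     "Complaint": 1,
--     "Complaint and Request for Summary Suspension": 1,
--     "Amended Complaint": 2,
--     "First Amended Complaint": 2,
--     "Second Amended Complaint": 3,
--     "Third Amended Complaint": 4,
-- }
--
-- def filter_complaints(filings: list[dict]) -> list[dict]:
--     """
--     Filter filings to only include complaints.
--     If a case has an amended complaint, use that instead of the original.
--     """
--     # Filter to only complaints
--     complaints = [f for f in filings if f.get("type") in COMPLAINT_PRIORITY]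
--
--     # Group by case_number and keep only the highest priority version
--     by_case: dict[str, dict] = {}
--     for filing in complaints:
--         case_num = filing["case_number"]
--         priority = COMPLAINT_PRIORITY.get(filing["type"], 0)
--
--         if case_num not in by_case:
--             by_case[case_num] = (filing, priority)
--         else:
--             _, existing_priority = by_case[case_num]
--             if priority > existing_priority:
--                 by_case[case_num] = (filing, priority)
--
--     return [filing for filing, _ in by_case.values()]
-- ===== SOURCE B (Python) =====
-- COMPLAINT_PRIORITY = {
--     "Complaint": 1,
--     "Complaint and Request for Summary Suspension": 1,
--     "Amended Complaint": 2,
--     "First Amended Complaint": 2,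
--     "Second Amended Complaint": 3,
--     "Third Amended Complaint": 4,
-- }
--
-- def filter_complaints(filings: list[dict]) -> list[dict]:
--     """Group complaint filings by case number, then keep each group's
--     highest-priority filing (max keeps the first maximal one)."""
--     groups: dict[str, list[dict]] = {}
--     for f in filings:
--         if f.get("type") in COMPLAINT_PRIORITY:
--             groups.setdefault(f["case_number"], []).append(f)
--     return [max(g, key=lambda f: COMPLAINT_PRIORITY.get(f["type"], 0))
--             for g in groups.values()]
-- ===== Notes on version B (the rewrite author's own statement) =====
-- stated objective: alternative
-- what changed: B replaces A's filter pass plus inline running-maximum dict of (filing, priority) pairs by a two-phase decomposition: one grouping pass building case_number -> list of complaint filings, then a selection pass taking max(group, key=priority) per group.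
import Mathlib
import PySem

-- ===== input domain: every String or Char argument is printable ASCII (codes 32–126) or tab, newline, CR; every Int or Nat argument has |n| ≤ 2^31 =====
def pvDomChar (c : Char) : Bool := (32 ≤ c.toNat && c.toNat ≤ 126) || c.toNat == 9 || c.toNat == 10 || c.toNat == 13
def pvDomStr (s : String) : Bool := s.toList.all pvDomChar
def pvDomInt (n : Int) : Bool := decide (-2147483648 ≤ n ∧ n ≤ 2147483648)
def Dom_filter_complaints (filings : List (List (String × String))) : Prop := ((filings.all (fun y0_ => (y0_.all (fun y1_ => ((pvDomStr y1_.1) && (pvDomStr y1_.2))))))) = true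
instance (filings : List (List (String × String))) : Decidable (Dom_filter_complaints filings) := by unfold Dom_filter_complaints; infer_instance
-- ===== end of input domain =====

-- B separates grouping (case_number -> its complaint filings) from selection (max by priority per
-- group) instead of A's filter pass plus inline running-maximum dict; same cost, different decomposition.

-- shared module constant COMPLAINT_PRIORITY, as the two operations both Pythons perform on it:
-- the membership test `t in COMPLAINT_PRIORITY` (t = f.get("type"), possibly None)
def pvIsComplaint (t : Option String) : Bool :=
  match t with
  | some s => (s == "Complaint") || (s == "Complaint and Request for Summary Suspension") ||
              (s == "Amended Complaint") || (s == "First Amended Complaint") ||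
              (s == "Second Amended Complaint") || (s == "Third Amended Complaint")
  | none => false

-- COMPLAINT_PRIORITY.get(t, 0)
def pvPrio (t : Option String) : Int :=
  match t with
  | some "Complaint" => 1
  | some "Complaint and Request for Summary Suspension" => 1
  | some "Amended Complaint" => 2
  | some "First Amended Complaint" => 2
  | some "Second Amended Complaint" => 3
  | some "Third Amended Complaint" => 4
  | _ => 0

-- f.get(k) on a Python dict rendered as an association list
def pvGetS (f : List (String × String)) (k : String) : Option String :=
  (PySem.Dict.mk f).get? k

-- ===== PORT A =====
-- the body of A's `for filing in complaints` loop; filing["case_number"] is rendered total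
-- (getD "") ONLY under Pre_filter_complaints, which guarantees the key is present
def pvStepA (d : PySem.Dict String (List (String × String) × Int))
    (filing : List (String × String)) : PySem.Dict String (List (String × String) × Int) :=
  let case_num := (PySem.Dict.mk filing).getD "case_number" ""
  let priority := pvPrio (pvGetS filing "type")
  match d.get? case_num with
  | none => d.insert case_num (filing, priority)
  | some (_, existing_priority) =>
      if priority > existing_priority then d.insert case_num (filing, priority) else d

def filter_complaints (filings : List (List (String × String))) : List (List (String × String)) :=
  let complaints := filings.filter (fun f => pvIsComplaint (pvGetS f "type"))
  let by_case := complaints.foldl pvStepA PySem.Dict.empty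
  by_case.values.map Prod.fst

-- ===== PORT B =====
-- groups.setdefault(f["case_number"], []).append(f)  =  modify key [] (· ++ [f]);
-- a group is never the empty list, so Python's no-default max(g, key=…) is maxD with an unreached default
def filter_complaints_alt (filings : List (List (String × String))) : List (List (String × String)) :=
  let groups := filings.foldl (fun d f =>
      if pvIsComplaint (pvGetS f "type") then
        d.modify ((PySem.Dict.mk f).getD "case_number" "") [] (· ++ [f])
      else d) PySem.Dict.empty
  groups.values.map (fun g => PySem.List.maxD g (fun f => pvPrio (pvGetS f "type")) [])

-- ===== PRECONDITION & SPEC =====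
-- Pre_ excludes exactly the inputs where Python A raises KeyError: a filing of a complaint type
-- with no "case_number" key (B raises KeyError there too).
def Pre_filter_complaints (filings : List (List (String × String))) : Prop :=
  ∀ f ∈ filings, pvIsComplaint (pvGetS f "type") = true →
    (PySem.Dict.mk f).contains "case_number" = true

instance (filings : List (List (String × String))) : Decidable (Pre_filter_complaints filings) := by
  unfold Pre_filter_complaints; infer_instance

def pvWitness_filter_complaints : (List (List (String × String))) :=
  [[("type", "Complaint"), ("case_number", "1")],
   [("type", "Amended Complaint"), ("case_number", "1")],
   [("type", "Answer")]]

def Spec_filter_complaints (filings : List (List (String × String))) (out : List (List (String × String))) : Prop := out = filter_complaints_alt filings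
instance (filings : List (List (String × String))) (out : List (List (String × String))) : Decidable (Spec_filter_complaints filings out) := by unfold Spec_filter_complaints; infer_instance

-- ===== CLAIM (what is proved, stated in full; the proofs are below) =====
def Claim_equal_filter_complaints : Prop := ∀ (filings : List (List (String × String))), Dom_filter_complaints filings → Pre_filter_complaints filings → Spec_filter_complaints filings (filter_complaints filings)

-- ===== LEMMAS AND PROOFS =====

-- B's key function and per-group winner
def pvKeyF (f : List (String × String)) : Int := pvPrio (pvGetS f "type")

def pvBest (g : List (List (String × String))) : List (String × String) :=
  PySem.List.maxD g pvKeyF []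

-- A's dict entry as determined by B's group for the same case number
def pvMapA (ps : List (String × List (List (String × String)))) :
    List (String × (List (String × String) × Int)) :=
  ps.map (fun p => (p.1, (pvBest p.2, pvKeyF (pvBest p.2))))

lemma pv_max?_append (l : List (List (String × String))) (f : List (String × String)) :
    PySem.List.max? (l ++ [f]) pvKeyF = some (match PySem.List.max? l pvKeyF with
      | none => f
      | some m => if pvKeyF m < pvKeyF f then f else m) := by
  cases hml : PySem.List.max? l pvKeyF with
  | none =>
    simp only [PySem.List.max?, List.foldl_append, List.foldl_cons, List.foldl_nil] at *
    rw [hml]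
  | some m =>
    simp only [PySem.List.max?, List.foldl_append, List.foldl_cons, List.foldl_nil] at *
    rw [hml]
    by_cases hc : pvKeyF m < pvKeyF f <;> simp [hc]

lemma pv_max?_some (g : List (List (String × String))) (hg : g ≠ []) :
    PySem.List.max? g pvKeyF = some (pvBest g) := by
  rcases List.eq_nil_or_concat g with rfl | ⟨l, x, rfl⟩
  · exact absurd rfl hg
  · rw [List.concat_eq_append]
    rw [pv_max?_append, pvBest, PySem.List.maxD, pv_max?_append, Option.getD_some]

lemma pv_best_append (g : List (List (String × String))) (hg : g ≠ []) (f : List (String × String)) :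
    pvBest (g ++ [f]) = if pvKeyF (pvBest g) < pvKeyF f then f else pvBest g := by
  rw [pvBest, PySem.List.maxD, pv_max?_append, Option.getD_some, pv_max?_some g hg]

lemma pv_get?_mapA (ps : List (String × List (List (String × String)))) (c : String) :
    (PySem.Dict.mk (pvMapA ps)).get? c =
      ((PySem.Dict.mk ps).get? c).map (fun g => (pvBest g, pvKeyF (pvBest g))) := by
  induction ps with
  | nil => simp [pvMapA, PySem.Dict.get?]
  | cons p ps ih =>
    show (PySem.Dict.mk ((p.1, (pvBest p.2, pvKeyF (pvBest p.2))) :: pvMapA ps)).get? c = _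
    rw [PySem.Dict.get?_mk_cons, PySem.Dict.get?_mk_cons]
    by_cases h : p.1 == c <;> simp [h, ih]

lemma pv_step_eq (ps : List (String × List (List (String × String))))
    (hnd : (PySem.Dict.mk ps).keys.Nodup)
    (hne : ∀ p ∈ ps, p.2 ≠ []) (f : List (String × String)) :
    pvStepA (PySem.Dict.mk (pvMapA ps)) f =
      PySem.Dict.mk (pvMapA ((PySem.Dict.mk ps).modify
        ((PySem.Dict.mk f).getD "case_number" "") [] (· ++ [f])).items) := by
  simp only [pvStepA]
  set c := (PySem.Dict.mk f).getD "case_number" "" with hcdef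
  rw [pv_get?_mapA]
  cases h : (PySem.Dict.mk ps).get? c with
  | none =>
    have hcon : (PySem.Dict.mk ps).contains c = false := by
      rw [PySem.Dict.contains_eq_isSome_get?, h]; rfl
    have hconA : (PySem.Dict.mk (pvMapA ps)).contains c = false := by
      rw [PySem.Dict.contains_eq_isSome_get?, pv_get?_mapA, h]; rfl
    apply PySem.Dict.ext
    simp only [Option.map_none]
    rw [PySem.Dict.modify, PySem.Dict.getD_of_get?_eq_none _ [] h]
    rw [PySem.Dict.items_insert_of_not_contains _ _ hcon,
        PySem.Dict.items_insert_of_not_contains _ _ hconA]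
    simp [pvMapA, pvBest, PySem.List.maxD, PySem.List.max?, pvKeyF]
  | some g =>
    have hmem : (c, g) ∈ ps := PySem.Dict.mem_items_of_get?_eq_some _ h
    have hg : g ≠ [] := hne _ hmem
    have hcon : (PySem.Dict.mk ps).contains c = true := by
      rw [PySem.Dict.contains_eq_isSome_get?, h]; rfl
    have hconA : (PySem.Dict.mk (pvMapA ps)).contains c = true := by
      rw [PySem.Dict.contains_eq_isSome_get?, pv_get?_mapA, h]; rfl
    simp only [Option.map_some]
    rw [PySem.Dict.modify, PySem.Dict.getD_of_get?_eq_some _ [] h]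
    by_cases hlt : pvKeyF (pvBest g) < pvKeyF f
    · rw [if_pos (show pvPrio (pvGetS f "type") > pvKeyF (pvBest g) from hlt)]
      apply PySem.Dict.ext
      rw [PySem.Dict.items_insert_of_contains _ _ hcon,
          PySem.Dict.items_insert_of_contains _ _ hconA]
      show (pvMapA ps).map _ = pvMapA (ps.map _)
      simp only [pvMapA, List.map_map]
      apply List.map_congr_left
      intro p hp
      by_cases hpc : p.1 == c
      · simp only [Function.comp, hpc, if_true]
        rw [pv_best_append g hg f, if_pos hlt]
        rfl
      · simp [Function.comp, hpc]
    · rw [if_neg (show ¬ pvPrio (pvGetS f "type") > pvKeyF (pvBest g) from hlt)]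
      apply PySem.Dict.ext
      rw [PySem.Dict.items_insert_of_contains _ _ hcon]
      show pvMapA ps = pvMapA (ps.map _)
      simp only [pvMapA, List.map_map]
      apply List.map_congr_left
      intro p hp
      by_cases hpc : p.1 == c
      · have hpc' : p.1 = c := by simpa using hpc
        have hpg : p.2 = g := by
          have h2 : (PySem.Dict.mk ps).get? p.1 = some p.2 :=
            PySem.Dict.get?_of_mem_items _ (by simpa using hp) hnd
          rw [hpc', h] at h2
          exact (Option.some_injective _ h2).symm
        simp only [Function.comp, hpc, if_true]
        rw [pv_best_append g hg f, if_neg hlt, ← hpc', ← hpg]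
      · simp [Function.comp, hpc]

lemma pv_loop_eq (l : List (List (String × String)))
    (d : PySem.Dict String (List (List (String × String))))
    (hnd : d.keys.Nodup) (hne : ∀ p ∈ d.items, p.2 ≠ []) :
    l.foldl (fun d0 f => if pvIsComplaint (pvGetS f "type") then pvStepA d0 f else d0)
        (PySem.Dict.mk (pvMapA d.items)) =
      PySem.Dict.mk (pvMapA (l.foldl (fun d0 f =>
        if pvIsComplaint (pvGetS f "type") then
          d0.modify ((PySem.Dict.mk f).getD "case_number" "") [] (· ++ [f])
        else d0) d).items) := by
  induction l generalizing d with
  | nil => rfl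
  | cons f l ih =>
    simp only [List.foldl_cons]
    by_cases hf : pvIsComplaint (pvGetS f "type")
    · rw [if_pos hf, if_pos hf]
      have hnd' : (d.modify ((PySem.Dict.mk f).getD "case_number" "") [] (· ++ [f])).keys.Nodup := by
        rw [PySem.Dict.modify]
        exact PySem.Dict.nodup_keys_insert _ _ _ hnd
      have hne' : ∀ p ∈ (d.modify ((PySem.Dict.mk f).getD "case_number" "") [] (· ++ [f])).items,
          p.2 ≠ [] := by
        intro p hp
        rw [PySem.Dict.modify] at hp
        rcases (PySem.Dict.mem_items_insert _ _ _ _).1 hp with rfl | ⟨hp', _⟩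
        · simp
        · exact hne _ hp'
      have hstep := pv_step_eq d.items hnd hne f
      rw [hstep]
      exact ih _ hnd' hne'
    · rw [if_neg hf, if_neg hf]
      exact ih d hnd hne

-- ===== VERDICT (by name: the statement is the Claim_ definition above) =====
theorem filter_complaints_spec : Claim_equal_filter_complaints := by
  intro filings _ _
  unfold Spec_filter_complaints filter_complaints filter_complaints_alt
  simp only [List.foldl_filter]
  have h := pv_loop_eq filings PySem.Dict.empty (by simp [PySem.Dict.empty])
      (by simp [PySem.Dict.empty])
  rw [show (PySem.Dict.empty : PySem.Dict String (List (String × String) × Int)) =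
      PySem.Dict.mk (pvMapA (PySem.Dict.empty :
        PySem.Dict String (List (List (String × String)))).items) from rfl]
  rw [h]
  simp only [PySem.Dict.values, pvMapA, List.map_map]
  rfl
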